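-- pv_equiv track=rewrite | github.com/Nalin-Chopra/DataStructures-Algorithms | DataStructures_Algorithms.py | compute_binary_rep
-- ===== SOURCE A (Python) =====
-- def compute_binary_rep(arr, start, end):
--     total = 0
--     power = 0
--
--     for i in range(end, start - 1, -1):
--
--         cur_val = arr[i]
--         total += cur_val * 2 ** power
--         power += 1
--
--     return total
-- ===== SOURCE B (Python) =====
-- def compute_binary_rep(arr, start, end):
--     # Horner's method: ascending pass, multiply-accumulate, no power variable.
--     total = 0
--     for i in range(start, end + 1):
--         total = total * 2 + arr[i]
--     return total
-- ===== Notes on version B (the rewrite author's own statement) =====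
-- stated objective: simpler
-- what changed: Replaced the descending loop with an explicit power counter and 2**power exponentiation by a single ascending Horner multiply-accumulate pass (total = total*2 + arr[i]).
import Mathlib
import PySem

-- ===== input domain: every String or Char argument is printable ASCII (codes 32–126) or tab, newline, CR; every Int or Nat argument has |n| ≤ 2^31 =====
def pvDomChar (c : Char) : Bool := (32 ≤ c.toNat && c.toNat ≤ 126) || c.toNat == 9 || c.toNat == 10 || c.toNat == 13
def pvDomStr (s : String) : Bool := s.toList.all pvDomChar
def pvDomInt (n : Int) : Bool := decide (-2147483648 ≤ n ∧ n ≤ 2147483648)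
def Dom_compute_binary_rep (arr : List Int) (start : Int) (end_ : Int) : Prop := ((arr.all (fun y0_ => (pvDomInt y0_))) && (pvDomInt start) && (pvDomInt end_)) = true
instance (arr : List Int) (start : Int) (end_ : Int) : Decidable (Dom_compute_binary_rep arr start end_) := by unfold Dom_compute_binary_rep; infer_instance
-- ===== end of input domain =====

-- B replaces A's descending loop with power counter and 2**power by a single ascending Horner pass (simpler decomposition).

-- ===== PORT A =====
-- total/power state folded over range(end, start-1, -1); arr[i] via pyGetD (default never used inside Pre_)
def compute_binary_rep (arr : List Int) (start : Int) (end_ : Int) : Int :=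
  ((PySem.List.pyRange end_ (start - 1) (-1)).foldl
    (fun (st : Int × Nat) i => (st.1 + (PySem.List.pyGetD arr i 0) * 2 ^ st.2, st.2 + 1))
    (0, 0)).1

-- ===== PORT B =====
def compute_binary_rep_alt (arr : List Int) (start : Int) (end_ : Int) : Int :=
  (PySem.List.pyRange start (end_ + 1) 1).foldl
    (fun t i => t * 2 + PySem.List.pyGetD arr i 0) 0

-- ===== PRECONDITION & SPEC =====
-- Pre_ excludes exactly the inputs where arr[i] raises IndexError in A (an index in [start, end] out of range)
def Pre_compute_binary_rep (arr : List Int) (start : Int) (end_ : Int) : Prop :=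
  end_ < start ∨ (-(arr.length : Int) ≤ start ∧ end_ < (arr.length : Int))
instance (arr : List Int) (start : Int) (end_ : Int) : Decidable (Pre_compute_binary_rep arr start end_) := by unfold Pre_compute_binary_rep; infer_instance
def pvWitness_compute_binary_rep : List Int × Int × Int := ([1, 0, 1, 1], 1, 3)

def Spec_compute_binary_rep (arr : List Int) (start : Int) (end_ : Int) (out : Int) : Prop := out = compute_binary_rep_alt arr start end_
instance (arr : List Int) (start : Int) (end_ : Int) (out : Int) : Decidable (Spec_compute_binary_rep arr start end_ out) := by unfold Spec_compute_binary_rep; infer_instance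

-- ===== CLAIM (what is proved, stated in full; the proofs are below) =====
def Claim_equal_compute_binary_rep : Prop := ∀ (arr : List Int) (start : Int) (end_ : Int), Dom_compute_binary_rep arr start end_ → Pre_compute_binary_rep arr start end_ → Spec_compute_binary_rep arr start end_ (compute_binary_rep arr start end_)

-- ===== LEMMAS AND PROOFS =====

-- Horner fold with a nonzero accumulator splits off the accumulator scaled by 2^length
theorem horner_shift (f : Int → Int) (l : List Int) (a : Int) :
    l.foldl (fun t i => t * 2 + f i) a
      = a * 2 ^ l.length + l.foldl (fun t i => t * 2 + f i) 0 := by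
  induction l generalizing a with
  | nil => simp
  | cons x xs ih =>
    simp only [List.foldl_cons, List.length_cons]
    rw [ih (a * 2 + f x), ih (0 * 2 + f x)]
    ring

-- A's fold over the reversed index list equals Horner over the list
theorem foldA_reverse (f : Int → Int) (l : List Int) (t : Int) (p : Nat) :
    (l.reverse.foldl (fun (st : Int × Nat) i => (st.1 + f i * 2 ^ st.2, st.2 + 1)) (t, p))
      = (t + (l.foldl (fun t i => t * 2 + f i) 0) * 2 ^ p, p + l.length) := by
  induction l generalizing t p with
  | nil => simp
  | cons x xs ih =>
    simp only [List.reverse_cons, List.foldl_append, List.foldl_cons, List.foldl_nil,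
      List.length_cons, ih]
    rw [horner_shift f xs (0 * 2 + f x)]
    rw [Prod.mk.injEq]
    refine ⟨?_, by omega⟩
    rw [pow_add]; ring

-- ===== VERDICT (by name: the statement is the Claim_ definition above) =====
theorem compute_binary_rep_spec : Claim_equal_compute_binary_rep := by
  intro arr start end_ _ _
  unfold Spec_compute_binary_rep compute_binary_rep compute_binary_rep_alt
  rw [PySem.List.pyRange_neg_one_eq_reverse]
  have h : start - 1 + 1 = start := by ring
  rw [h, foldA_reverse]
  simp
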